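-- pv_equiv track=rewrite | github.com/Kawser-nerd/CLCDSA | Source Codes/CodeJamData/14/42/15.py | solve
-- ===== SOURCE A (Python) =====
-- def solve(n, s):
--     cnt = 0
--     while n > 0:
--         m = 0
--         for i in range(1, n):
--             if s[i] < s[m]:
--                 m = i
--         cnt += min(m, n-1-m)
--         n = n-1
--         del s[m]
--     return cnt
-- ===== SOURCE B (Python) =====
-- def solve(n, s):
--     # Per-element closed form: when element i is removed (processing in (value, index)
--     # order), the elements still present before it are exactly the j < i with s[j] > s[i],
--     # and those after it exactly the j > i with s[j] >= s[i]; no simulation needed.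
--     # (A mutates s in place; B does not — the equivalence is about the return value.)
--     return sum(
--         min(sum(1 for j in range(i) if s[j] > s[i]),
--             sum(1 for j in range(i + 1, n) if s[j] >= s[i]))
--         for i in range(n))
-- ===== Notes on version B (the rewrite author's own statement) =====
-- stated objective: simpler
-- what changed: A simulates the process (repeatedly scan for the first minimum of the remaining prefix, add its distance to the nearer end, delete it, mutating s in place); B replaces the whole simulation by a per-element closed form: the cost of element i is min(#{j<i : s[j]>s[i]}, #{i<j<n : s[j]>=s[i]}), summed over i, with no sorting, deletion or mutation.
import Mathlib
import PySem

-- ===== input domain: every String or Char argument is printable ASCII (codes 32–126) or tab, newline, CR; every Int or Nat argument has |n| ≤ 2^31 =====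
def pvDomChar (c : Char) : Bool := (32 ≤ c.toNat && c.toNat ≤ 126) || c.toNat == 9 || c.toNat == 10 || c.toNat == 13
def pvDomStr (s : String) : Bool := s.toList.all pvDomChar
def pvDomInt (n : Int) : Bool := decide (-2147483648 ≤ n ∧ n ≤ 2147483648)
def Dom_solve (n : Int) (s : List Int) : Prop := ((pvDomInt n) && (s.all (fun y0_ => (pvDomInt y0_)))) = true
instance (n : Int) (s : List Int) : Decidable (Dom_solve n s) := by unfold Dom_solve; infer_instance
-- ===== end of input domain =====

-- B replaces A's O(n^2) delete-the-minimum simulation by a per-element closed form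
-- (count surviving neighbours on each side directly); A mutates its list argument in
-- place, B does not — the equivalence proved here is about the return value only.

-- shared transliteration of Python's s[i] (in range under Pre_)
def pvGet (s : List Int) (i : Int) : Int := (PySem.List.pyGet? s i).getD 0

-- ===== PORT A =====
def solveGo (n : Int) (s : List Int) (cnt : Int) : Int :=
  if 0 < n then
    let m := (PySem.List.pyRange 1 n 1).foldl
      (fun m i => if pvGet s i < pvGet s m then i else m) 0
    solveGo (n - 1) (s.eraseIdx m.toNat) (cnt + min m (n - 1 - m))
  else cnt
termination_by n.toNat
decreasing_by omega

def solve (n : Int) (s : List Int) : Int := solveGo n s 0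

-- ===== PORT B =====
def solve_alt (n : Int) (s : List Int) : Int :=
  (PySem.List.pyRange 0 n 1).foldl (fun acc i =>
    acc + min
      ((PySem.List.pyRange 0 i 1).foldl
        (fun c j => if pvGet s j > pvGet s i then c + 1 else c) 0)
      ((PySem.List.pyRange (i + 1) n 1).foldl
        (fun c j => if pvGet s j ≥ pvGet s i then c + 1 else c) 0)) 0

-- ===== PRECONDITION & SPEC =====
-- Pre_ excludes exactly the inputs where Python A raises IndexError: n > len(s).
def Pre_solve (n : Int) (s : List Int) : Prop := n ≤ (s.length : Int)
instance (n : Int) (s : List Int) : Decidable (Pre_solve n s) := by unfold Pre_solve; infer_instance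
def pvWitness_solve : Int × List Int := (3, [2, 1, 2])

def Spec_solve (n : Int) (s : List Int) (out : Int) : Prop := out = solve_alt n s
instance (n : Int) (s : List Int) (out : Int) : Decidable (Spec_solve n s out) := by unfold Spec_solve; infer_instance

-- ===== CLAIM (what is proved, stated in full; the proofs are below) =====
def Claim_equal_solve : Prop := ∀ (n : Int) (s : List Int), Dom_solve n s → Pre_solve n s → Spec_solve n s (solve n s)

-- ===== LEMMAS AND PROOFS =====

-- g k = s[k] as a total function on Nat indices
def pvG (s : List Int) (k : Nat) : Int := s.getD k 0

theorem pvGet_natCast (s : List Int) (j : Nat) : pvGet s (j : Int) = pvG s j := by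
  simp [pvGet, pvG, PySem.List.pyGet?_natCast, List.getD_eq_getElem?_getD]

-- index of the FIRST minimum of a list
def fam : List Int → Nat
  | [] => 0
  | [_] => 0
  | x :: y :: t =>
      if (y :: t).getD (fam (y :: t)) 0 < x then fam (y :: t) + 1 else 0

theorem fam_lt {l : List Int} (h : l ≠ []) : fam l < l.length := by
  induction l with
  | nil => simp at h
  | cons x xs ih =>
    cases xs with
    | nil => simp [fam]
    | cons y t =>
      have ihx := ih (by simp)
      simp only [fam]
      split <;> simp_all

theorem fam_min (l : List Int) (k : Nat) (hk : k < l.length) :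
    l.getD (fam l) 0 ≤ l.getD k 0 := by
  induction l generalizing k with
  | nil => simp at hk
  | cons x xs ih =>
    cases xs with
    | nil =>
      cases k with
      | zero => simp [fam]
      | succ k => simp at hk
    | cons y t =>
      simp only [fam]
      split
      · rename_i hc
        cases k with
        | zero => simpa using le_of_lt hc
        | succ k => simpa using ih k (by simpa using hk)
      · rename_i hc
        cases k with
        | zero => simp
        | succ k =>
          have h1 : (y :: t).getD (fam (y :: t)) 0 ≤ (y :: t).getD k 0 :=
            ih k (by simpa using hk)
          simp only [List.getD_cons_zero, List.getD_cons_succ]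
          omega

theorem fam_first (l : List Int) (k : Nat) (hk : k < fam l) :
    l.getD (fam l) 0 < l.getD k 0 := by
  induction l generalizing k with
  | nil => simp [fam] at hk
  | cons x xs ih =>
    cases xs with
    | nil => simp [fam] at hk
    | cons y t =>
      simp only [fam] at hk ⊢
      split
      · rename_i hc
        cases k with
        | zero => simpa using hc
        | succ k =>
          rw [if_pos hc] at hk
          simpa using ih k (by omega)
      · rename_i hc
        rw [if_neg hc] at hk
        omega

theorem getD_append_lt (l : List Int) (x : Int) (i : Nat) (h : i < l.length) :
    (l ++ [x]).getD i 0 = l.getD i 0 := by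
  simp [List.getD_eq_getElem?_getD, List.getElem?_append_left h]

theorem getD_append_len (l : List Int) (x : Int) :
    (l ++ [x]).getD l.length 0 = x := by
  simp [List.getD_eq_getElem?_getD]

theorem fam_append_singleton (l : List Int) (x : Int) (h : l ≠ []) :
    fam (l ++ [x]) = if x < l.getD (fam l) 0 then l.length else fam l := by
  induction l with
  | nil => simp at h
  | cons a xs ih =>
    cases xs with
    | nil => simp [fam]
    | cons b t =>
      have hne : (b :: t) ≠ [] := by simp
      have hfl : fam (b :: t) < (b :: t).length := fam_lt hne
      have ihr : fam (b :: (t ++ [x]))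
          = if x < (b :: t).getD (fam (b :: t)) 0 then (b :: t).length else fam (b :: t) := by
        have := ih hne
        simpa using this
      have hgetlen : (b :: (t ++ [x])).getD (b :: t).length 0 = x := by
        rw [← List.cons_append]; exact getD_append_len _ _
      have hgetlt : ∀ i, i < (b :: t).length → (b :: (t ++ [x])).getD i 0 = (b :: t).getD i 0 := by
        intro i hi; rw [← List.cons_append]; exact getD_append_lt _ _ _ hi
      simp only [List.cons_append, fam, ihr]
      by_cases h1 : x < (b :: t).getD (fam (b :: t)) 0
      · rw [if_pos h1, hgetlen]
        by_cases h2 : (b :: t).getD (fam (b :: t)) 0 < a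
        · have hxa : x < a := lt_trans h1 h2
          rw [if_pos h2, if_pos hxa]
          have : (a :: b :: t).getD (fam (b :: t) + 1) 0 = (b :: t).getD (fam (b :: t)) 0 := by
            simp [List.getD_cons_succ]
          rw [this, if_pos h1]
          simp
        · rw [if_neg h2]
          have : (a :: b :: t).getD 0 0 = a := by simp
          rw [this]
          by_cases hxa : x < a
          · rw [if_pos hxa, if_pos hxa]; simp
          · rw [if_neg hxa, if_neg hxa]
      · rw [if_neg h1, hgetlt _ hfl]
        by_cases h2 : (b :: t).getD (fam (b :: t)) 0 < a
        · rw [if_pos h2]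
          have : (a :: b :: t).getD (fam (b :: t) + 1) 0 = (b :: t).getD (fam (b :: t)) 0 := by
            simp [List.getD_cons_succ]
          rw [this, if_neg h1]
        · rw [if_neg h2]
          have : (a :: b :: t).getD 0 0 = a := by simp
          rw [this]
          have hxa : ¬ x < a := by omega
          rw [if_neg hxa]

-- A's value as a structural recursion on the processed list
def aspec (l : List Int) : Int :=
  if h : l = [] then 0
  else
    min ((fam l : Int)) ((l.length : Int) - 1 - (fam l)) + aspec (l.eraseIdx (fam l))
termination_by l.length
decreasing_by
  have := fam_lt h
  simp [List.length_eraseIdx, this]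
  omega

theorem getD_take (s : List Int) (k j : Nat) (hj : j < k) :
    (s.take k).getD j 0 = s.getD j 0 := by
  simp [List.getD_eq_getElem?_getD, List.getElem?_take_of_lt hj]

theorem foldA (s : List Int) (k : Nat) (h1 : 1 ≤ k) (h2 : k ≤ s.length) :
    (PySem.List.pyRange 1 (k : Int) 1).foldl
      (fun m i => if pvGet s i < pvGet s m then i else m) 0
    = ((fam (s.take k) : Nat) : Int) := by
  induction k, h1 using Nat.le_induction with
  | base =>
    rw [PySem.List.pyRange_one_eq_nil (by norm_num)]
    cases s with
    | nil => simp at h2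
    | cons a t => simp [fam]
  | succ k hk ih =>
    have h2' : k ≤ s.length := by omega
    have hkl : k < s.length := by omega
    have hcast : ((k + 1 : Nat) : Int) = (k : Int) + 1 := by push_cast; ring
    rw [hcast, PySem.List.pyRange_one_succ_right (by exact_mod_cast Nat.one_le_cast.mpr hk),
      List.foldl_append, ih h2']
    have hne : s.take k ≠ [] := by
      have : (s.take k).length = k := by simp [List.length_take]; omega
      intro hnil; rw [hnil] at this; simp at this; omega
    have hfl : fam (s.take k) < k := by
      have := fam_lt hne
      simpa [List.length_take, Nat.min_eq_left h2'] using this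
    have htake : s.take (k + 1) = s.take k ++ [s.getD k 0] := by
      rw [List.take_succ]
      congr 1
      rw [List.getElem?_eq_getElem hkl]
      simp [List.getD_eq_getElem?_getD, List.getElem?_eq_getElem hkl]
    rw [htake, fam_append_singleton _ _ hne]
    have hlen : (s.take k).length = k := by simp [List.length_take]; omega
    have e1 : pvGet s (k : Int) = s.getD k 0 := pvGet_natCast s k
    have e2 : pvGet s ((fam (s.take k) : Nat) : Int) = (s.take k).getD (fam (s.take k)) 0 := by
      rw [pvGet_natCast]
      unfold pvG
      rw [getD_take s k _ hfl]
    simp only [List.foldl_cons, List.foldl_nil, e1, e2, hlen]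
    split <;> simp

theorem take_eraseIdx (s : List Int) (k m : Nat) (hm : m < k) (hk : k ≤ s.length) :
    (s.take k).eraseIdx m = (s.eraseIdx m).take (k - 1) := by
  rw [List.eraseIdx_eq_take_drop_succ, List.eraseIdx_eq_take_drop_succ]
  rw [List.take_take, Nat.min_eq_left (le_of_lt hm), List.drop_take]
  have hlen : (s.take m).length = m := by simp [List.length_take]; omega
  have hsplit : k - 1 = (s.take m).length + (k - 1 - m) := by omega
  rw [hsplit, List.take_length_add_append]
  congr 1
  congr 1
  omega

theorem solveGo_eq (k : Nat) : ∀ (s : List Int) (cnt : Int), k ≤ s.length →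
    solveGo (k : Int) s cnt = cnt + aspec (s.take k) := by
  induction k with
  | zero =>
    intro s cnt _
    rw [solveGo, aspec]
    simp
  | succ k ih =>
    intro s cnt h
    have hkl : k + 1 ≤ s.length := h
    have hpos : (0 : Int) < ((k + 1 : Nat) : Int) := by positivity
    rw [solveGo, if_pos hpos]
    simp only []
    rw [foldA s (k + 1) (by omega) hkl]
    set t := s.take (k + 1) with ht
    have htlen : t.length = k + 1 := by simp [ht, List.length_take]; omega
    have htne : t ≠ [] := by intro hnil; rw [hnil] at htlen; simp at htlen
    have hfl : fam t < k + 1 := by have := fam_lt htne; omega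
    have htoNat : ((fam t : Nat) : Int).toNat = fam t := Int.toNat_natCast _
    rw [htoNat]
    have hlen' : k ≤ (s.eraseIdx (fam t)).length := by
      rw [List.length_eraseIdx]
      split <;> omega
    have hsub : ((k + 1 : Nat) : Int) - 1 = (k : Nat) := by push_cast; ring
    rw [hsub, ih _ _ hlen']
    have herase : (s.eraseIdx (fam t)).take k = t.eraseIdx (fam t) := by
      rw [ht, take_eraseIdx s (k + 1) (fam t) hfl hkl]
      norm_num
      rw [← ht]
    rw [herase]
    conv_rhs => rw [aspec]
    rw [dif_neg htne, htlen]
    push_cast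
    have hx : (k : Int) + 1 - 1 = (k : Int) := by ring
    rw [hx]
    ring

-- B's per-element counts
def aCnt (g : Nat → Int) (k : Nat) : Nat :=
  (List.range k).countP (fun j => g k < g j)
def bCnt (g : Nat → Int) (N k : Nat) : Nat :=
  (List.range (N - (k + 1))).countP (fun j => g k ≤ g (k + 1 + j))
def cB (g : Nat → Int) (N k : Nat) : Int := min (aCnt g k : Int) (bCnt g N k : Int)

theorem foldl_ite_count (p : Nat → Prop) [DecidablePred p] (l : List Nat) (a : Int) :
    l.foldl (fun c j => if p j then c + 1 else c) a = a + ((l.countP (fun j => decide (p j)) : Nat) : Int) := by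
  induction l generalizing a with
  | nil => simp
  | cons x t ih =>
    simp only [List.foldl_cons, List.countP_cons, ih]
    by_cases hp : p x
    · simp [hp]; push_cast; ring
    · simp [hp]

theorem solve_alt_eq (s : List Int) (N : Nat) :
    solve_alt (N : Int) s = ((List.range N).map (cB (pvG s) N)).sum := by
  unfold solve_alt
  rw [PySem.List.pyRange_zero_natCast, List.foldl_map]
  rw [show (fun (acc : Int) (k : Nat) =>
        acc + min
          ((PySem.List.pyRange 0 ((k : Int)) 1).foldl
            (fun c j => if pvGet s j > pvGet s (k : Int) then c + 1 else c) 0)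
          ((PySem.List.pyRange ((k : Int) + 1) (N : Int) 1).foldl
            (fun c j => if pvGet s j ≥ pvGet s (k : Int) then c + 1 else c) 0))
      = (fun (acc : Int) (k : Nat) => acc +
          min ((PySem.List.pyRange 0 ((k : Int)) 1).foldl
            (fun c j => if pvGet s j > pvGet s (k : Int) then c + 1 else c) 0)
          ((PySem.List.pyRange ((k : Int) + 1) (N : Int) 1).foldl
            (fun c j => if pvGet s j ≥ pvGet s (k : Int) then c + 1 else c) 0)) from rfl]
  rw [PySem.List.foldl_add]
  rw [zero_add]
  congr 1
  apply List.map_congr_left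
  intro k hk
  have hkN : k < N := List.mem_range.mp hk
  -- first inner count
  have e1 : (PySem.List.pyRange 0 ((k : Int)) 1).foldl
      (fun c j => if pvGet s j > pvGet s (k : Int) then c + 1 else c) 0
      = ((aCnt (pvG s) k : Nat) : Int) := by
    rw [PySem.List.pyRange_zero_natCast, List.foldl_map,
      foldl_ite_count (fun j => pvGet s ((j : Nat) : Int) > pvGet s ((k : Nat) : Int))]
    rw [zero_add]
    unfold aCnt
    congr 1
    apply List.countP_congr
    intro j _
    simp only [decide_eq_true_eq, pvGet_natCast]
  -- second inner count
  have e2 : (PySem.List.pyRange ((k : Int) + 1) (N : Int) 1).foldl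
      (fun c j => if pvGet s j ≥ pvGet s (k : Int) then c + 1 else c) 0
      = ((bCnt (pvG s) N k : Nat) : Int) := by
    rw [PySem.List.pyRange_one, List.foldl_map,
      foldl_ite_count (fun j => pvGet s ((k : Int) + 1 + (j : Nat)) ≥ pvGet s ((k : Nat) : Int))]
    rw [zero_add]
    unfold bCnt
    have hN : ((N : Int) - ((k : Int) + 1)).toNat = N - (k + 1) := by omega
    rw [hN]
    congr 1
    apply List.countP_congr
    intro j _
    have hc : ((k : Int) + 1 + (j : Nat)) = (((k + 1 + j : Nat) : Int)) := by push_cast; ring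
    simp only [decide_eq_true_eq, hc, pvGet_natCast]
  rw [e1, e2]
  rfl

theorem countP_nodup_eq (l₁ l₂ : List Nat) (h₁ : l₁.Nodup) (h₂ : l₂.Nodup)
    (p₁ p₂ : Nat → Bool) (hmem : ∀ x, (x ∈ l₁ ∧ p₁ x) ↔ (x ∈ l₂ ∧ p₂ x)) :
    l₁.countP p₁ = l₂.countP p₂ := by
  rw [List.countP_eq_length_filter, List.countP_eq_length_filter]
  apply List.Perm.length_eq
  rw [List.perm_ext_iff_of_nodup (h₁.filter p₁) (h₂.filter p₂)]
  intro x
  simp only [List.mem_filter]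
  constructor
  · rintro ⟨hm, hp⟩; exact (hmem x).mp ⟨hm, hp⟩
  · rintro ⟨hm, hp⟩; exact (hmem x).mpr ⟨hm, hp⟩

theorem getD_mem {l : List Nat} {q : Nat} (hq : q < l.length) : l.getD q 0 ∈ l := by
  rw [List.getD_eq_getElem?_getD, List.getElem?_eq_getElem hq]
  exact List.getElem_mem hq

theorem sorted_countP_lt (l : List Nat) (h : l.Pairwise (· < ·)) (q : Nat) (hq : q < l.length) :
    l.countP (fun x => decide (x < l.getD q 0)) = q := by
  induction l generalizing q with
  | nil => simp at hq
  | cons x xs ih =>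
    have hx : ∀ y ∈ xs, x < y := (List.pairwise_cons.mp h).1
    have htl : xs.Pairwise (· < ·) := (List.pairwise_cons.mp h).2
    cases q with
    | zero =>
      simp only [List.getD_cons_zero, List.countP_cons]
      have h0 : xs.countP (fun y => decide (y < x)) = 0 := by
        rw [List.countP_eq_zero]
        intro y hy
        simp only [decide_eq_true_eq]
        exact not_lt.mpr (le_of_lt (hx y hy))
      simp [h0]
    | succ q =>
      have hq' : q < xs.length := by simpa using hq
      simp only [List.getD_cons_succ, List.countP_cons]
      have hxq : x < xs.getD q 0 := hx _ (getD_mem hq')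
      rw [ih htl q hq', decide_eq_true hxq]
      simp

theorem sorted_countP_gt (l : List Nat) (h : l.Pairwise (· < ·)) (q : Nat) (hq : q < l.length) :
    l.countP (fun x => decide (l.getD q 0 < x)) = l.length - q - 1 := by
  induction l generalizing q with
  | nil => simp at hq
  | cons x xs ih =>
    have hx : ∀ y ∈ xs, x < y := (List.pairwise_cons.mp h).1
    have htl : xs.Pairwise (· < ·) := (List.pairwise_cons.mp h).2
    cases q with
    | zero =>
      simp only [List.getD_cons_zero, List.countP_cons]
      have hall : xs.countP (fun y => decide (x < y)) = xs.length := by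
        rw [List.countP_eq_length]
        intro y hy
        simp [hx y hy]
      simp [hall]
    | succ q =>
      have hq' : q < xs.length := by simpa using hq
      simp only [List.getD_cons_succ, List.countP_cons]
      have hxq : ¬ xs.getD q 0 < x := not_lt.mpr (le_of_lt (hx _ (getD_mem hq')))
      rw [ih htl q hq', decide_eq_false hxq]
      simp only [Bool.false_eq_true, if_false, add_zero, List.length_cons]
      omega

theorem map_eraseIdx' (l : List Nat) (f : Nat → Int) (i : Nat) :
    (l.map f).eraseIdx i = (l.eraseIdx i).map f := by
  rw [List.eraseIdx_eq_take_drop_succ, List.eraseIdx_eq_take_drop_succ,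
    List.map_append, List.map_take, List.map_drop]

theorem perm_getElem_cons_eraseIdx (l : List Nat) (p : Nat) (hp : p < l.length) :
    l.Perm (l.getD p 0 :: l.eraseIdx p) := by
  have hd : l.getD p 0 = l[p] := by
    rw [List.getD_eq_getElem?_getD, List.getElem?_eq_getElem hp]; rfl
  rw [hd]
  conv_lhs => rw [← List.take_append_drop p l, List.drop_eq_getElem_cons hp]
  rw [List.eraseIdx_eq_take_drop_succ]
  exact List.perm_middle

theorem range_shift_countP (N c : Nat) (hc : c ≤ N) (q : Nat → Bool) :
    (List.range (N - c)).countP (fun j => q (c + j))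
      = (List.range N).countP (fun x => decide (c ≤ x) && q x) := by
  have hsplit : N = c + (N - c) := by omega
  conv_rhs => rw [hsplit, List.range_add]
  rw [List.countP_append, List.countP_map]
  have h1 : (List.range c).countP (fun x => decide (c ≤ x) && q x) = 0 := by
    rw [List.countP_eq_zero]
    intro x hx
    have : x < c := List.mem_range.mp hx
    simp [Nat.not_le.mpr this]
  rw [h1, Nat.zero_add]
  apply List.countP_congr
  intro j _
  simp [Nat.le_add_right]

theorem main_lemma (g : Nat → Int) (N : Nat) :
    ∀ (n : Nat) (alive : List Nat), alive.length = n → alive.Pairwise (· < ·) →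
    (∀ i ∈ alive, i < N) →
    (∀ i ∈ alive, ∀ k, k < N → (g i < g k ∨ (g i = g k ∧ i < k)) → k ∈ alive) →
    aspec (alive.map g) = ((alive.map (cB g N)).sum) := by
  intro n
  induction n using Nat.strong_induction_on with
  | _ n IH =>
  intro alive hlen hsort hbd hup
  by_cases hnil : alive = []
  · subst hnil
    simp only [List.map_nil, List.sum_nil]
    rw [aspec]
    simp
  · have htne : alive.map g ≠ [] := by simpa using hnil
    have htlen : (alive.map g).length = alive.length := List.length_map ..
    have hp : fam (alive.map g) < alive.length := by
      have := fam_lt htne; omega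
    set p := fam (alive.map g) with hpdef
    set i0 := alive.getD p 0 with hi0def
    have hnodup : alive.Nodup := hsort.imp (fun h => Nat.ne_of_lt h)
    have hi0mem : i0 ∈ alive := getD_mem hp
    have hi0N : i0 < N := hbd _ hi0mem
    have hgetD : ∀ (q : Nat) (h : q < alive.length), alive.getD q 0 = alive[q] := by
      intro q h
      rw [List.getD_eq_getElem?_getD, List.getElem?_eq_getElem h]; rfl
    have hgt : ∀ (q : Nat), q < alive.length → (alive.map g).getD q 0 = g (alive.getD q 0) := by
      intro q h
      rw [List.getD_eq_getElem?_getD,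
        List.getElem?_eq_getElem (by omega : q < (alive.map g).length)]
      rw [hgetD q h]
      simp
    have hK1 : ∀ j ∈ alive, g i0 ≤ g j := by
      intro j hj
      obtain ⟨q, hq, rfl⟩ := List.mem_iff_getElem.mp hj
      have := fam_min (alive.map g) q (by omega)
      rw [hgt p hp, hgt q hq, hgetD q hq] at this
      exact this
    have hK3 : ∀ j ∈ alive, j ≠ i0 → g i0 < g j ∨ (g i0 = g j ∧ i0 < j) := by
      intro j hj hne
      obtain ⟨q, hq, rfl⟩ := List.mem_iff_getElem.mp hj
      have hqp : q ≠ p := by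
        intro h
        subst h
        apply hne
        rw [hi0def]
        exact (hgetD p hp).symm
      rcases Nat.lt_or_ge q p with hlt | hge
      · left
        have := fam_first (alive.map g) q hlt
        rw [hgt p hp, hgt q (by omega), hgetD q hq] at this
        exact this
      · have hpq : p < q := by omega
        have hio : i0 < alive[q] := by
          rw [hi0def, hgetD p hp]
          exact (List.pairwise_iff_getElem.mp hsort) p q hp hq hpq
        rcases lt_or_eq_of_le (hK1 alive[q] (List.getElem_mem hq)) with h | h
        · exact Or.inl h
        · exact Or.inr ⟨h, hio⟩
    have hK5 : aCnt g i0 = p := by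
      unfold aCnt
      rw [countP_nodup_eq (List.range i0) alive List.nodup_range hnodup
        _ (fun x => decide (x < i0)) ?_]
      · exact sorted_countP_lt alive hsort p hp
      · intro x
        constructor
        · rintro ⟨hxr, hpx⟩
          have hxi : x < i0 := List.mem_range.mp hxr
          have hgx : g i0 < g x := by simpa using hpx
          refine ⟨hup i0 hi0mem x (by omega) (Or.inl hgx), by simpa using hxi⟩
        · rintro ⟨hxa, hxlt⟩
          have hxi : x < i0 := by simpa using hxlt
          rcases hK3 x hxa (by omega) with h | ⟨_, h⟩
          · exact ⟨List.mem_range.mpr hxi, by simpa using h⟩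
          · omega
    have hK6 : bCnt g N i0 = alive.length - p - 1 := by
      unfold bCnt
      rw [range_shift_countP N (i0 + 1) (by omega) (fun x => decide (g i0 ≤ g x))]
      rw [countP_nodup_eq (List.range N) alive List.nodup_range hnodup
        _ (fun x => decide (i0 < x)) ?_]
      · exact sorted_countP_gt alive hsort p hp
      · intro x
        constructor
        · rintro ⟨hxr, hpx⟩
          have hx1 : i0 + 1 ≤ x ∧ g i0 ≤ g x := by simpa using hpx
          have hxN : x < N := List.mem_range.mp hxr
          rcases lt_or_eq_of_le hx1.2 with h | h
          · exact ⟨hup i0 hi0mem x hxN (Or.inl h), by simp [hx1.1]; omega⟩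
          · exact ⟨hup i0 hi0mem x hxN (Or.inr ⟨h, by omega⟩), by simp; omega⟩
        · rintro ⟨hxa, hxlt⟩
          have hxi : i0 < x := by simpa using hxlt
          exact ⟨List.mem_range.mpr (hbd x hxa), by simp [hK1 x hxa]; omega⟩
    have hcb : cB g N i0 = min (p : Int) ((alive.length : Int) - 1 - p) := by
      unfold cB
      rw [hK5, hK6]
      have : ((alive.length - p - 1 : Nat) : Int) = (alive.length : Int) - 1 - p := by omega
      rw [this]
    have hperm : alive.Perm (i0 :: alive.eraseIdx p) := perm_getElem_cons_eraseIdx alive p hp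
    have hlen' : (alive.eraseIdx p).length = alive.length - 1 := by
      rw [List.length_eraseIdx]; simp [hp]
    have hnodup' : (i0 :: alive.eraseIdx p).Nodup := hperm.nodup hnodup
    have hi0not : i0 ∉ alive.eraseIdx p := (List.nodup_cons.mp hnodup').1
    have hmem' : ∀ x, x ∈ alive.eraseIdx p ↔ (x ∈ alive ∧ x ≠ i0) := by
      intro x
      constructor
      · intro hx
        refine ⟨hperm.mem_iff.mpr (List.mem_cons_of_mem _ hx), ?_⟩
        intro h
        exact hi0not (h ▸ hx)
      · rintro ⟨hxa, hxne⟩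
        rcases List.mem_cons.mp (hperm.mem_iff.mp hxa) with h | h
        · exact absurd h hxne
        · exact h
    have hsort' : (alive.eraseIdx p).Pairwise (· < ·) :=
      List.Pairwise.sublist (List.eraseIdx_sublist alive p) hsort
    have hbd' : ∀ i ∈ alive.eraseIdx p, i < N := fun i hi => hbd i ((hmem' i).mp hi).1
    have hup' : ∀ i ∈ alive.eraseIdx p, ∀ k, k < N →
        (g i < g k ∨ (g i = g k ∧ i < k)) → k ∈ alive.eraseIdx p := by
      intro i hi k hkN hlex
      have hia := (hmem' i).mp hi
      have hka : k ∈ alive := hup i hia.1 k hkN hlex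
      have hkne : k ≠ i0 := by
        intro hk
        subst hk
        rcases hlex with h1 | ⟨h2a, h2b⟩ <;>
          rcases hK3 i hia.1 hia.2 with h3 | ⟨h4a, h4b⟩ <;> omega
      exact (hmem' k).mpr ⟨hka, hkne⟩
    have hlpos : 1 ≤ alive.length := by
      cases alive with
      | nil => exact absurd rfl hnil
      | cons a l => simp
    have hrec : aspec ((alive.eraseIdx p).map g) = ((alive.eraseIdx p).map (cB g N)).sum :=
      IH (alive.eraseIdx p).length (by omega) (alive.eraseIdx p) rfl hsort' hbd' hup'
    have haspec : aspec (alive.map g)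
        = min (p : Int) ((alive.length : Int) - 1 - p) + aspec ((alive.map g).eraseIdx p) := by
      conv_lhs => rw [aspec]
      rw [dif_neg htne, htlen, ← hpdef]
    have herase2 : (alive.map g).eraseIdx p = (alive.eraseIdx p).map g := map_eraseIdx' alive g p
    have hsum : (alive.map (cB g N)).sum = cB g N i0 + ((alive.eraseIdx p).map (cB g N)).sum := by
      have h := (hperm.map (cB g N)).sum_eq
      simpa using h
    rw [haspec, herase2, hrec, hsum, hcb]

-- ===== VERDICT (by name: the statement is the Claim_ definition above) =====
theorem solve_spec : Claim_equal_solve := by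
  intro n s _ hpre
  unfold Spec_solve
  unfold Pre_solve at hpre
  by_cases hpos : 0 < n
  · obtain ⟨N, rfl⟩ : ∃ N : Nat, n = (N : Int) :=
      ⟨n.toNat, (Int.toNat_of_nonneg (le_of_lt hpos)).symm⟩
    have hNle : N ≤ s.length := by exact_mod_cast hpre
    have hA : solve (N : Int) s = aspec (s.take N) := by
      unfold solve
      rw [solveGo_eq N s 0 hNle, zero_add]
    have hB : solve_alt (N : Int) s = ((List.range N).map (cB (pvG s) N)).sum :=
      solve_alt_eq s N
    have hmap : (List.range N).map (pvG s) = s.take N := by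
      apply List.ext_getElem
      · simp [List.length_take]
        omega
      · intro i h1 h2
        have hiN : i < N := by simpa using h1
        have his : i < s.length := by
          have := List.length_take (l := s) (i := N)
          omega
        simp only [List.getElem_map, List.getElem_take, List.getElem_range]
        unfold pvG
        rw [List.getD_eq_getElem?_getD, List.getElem?_eq_getElem his]
        rfl
    have hmain := main_lemma (pvG s) N N (List.range N) (by simp)
      List.pairwise_lt_range (fun i hi => List.mem_range.mp hi)
      (fun i _ k hk _ => List.mem_range.mpr hk)
    rw [hA, hB, ← hmap, hmain]
  · have hn0 : n ≤ 0 := not_lt.mp hpos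
    unfold solve
    rw [solveGo, if_neg hpos]
    unfold solve_alt
    rw [PySem.List.pyRange_one_eq_nil hn0]
    rfl
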